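-- pv_equiv track=rewrite | github.com/Fondamenti18/fondamenti-di-programmazione | students/1812851/homework03/program02.py | convertitore
-- ===== SOURCE A (Python) =====
-- def convertitore(st):
--     st=str(st)
--     x=0
--     y=0
--     ris=[]
--     for i in range(len(st)):
--         if st[i]=='0':
--             x+=40
--         if st[i]=='1':
--             y+=40
--         if st[i]=='2':
--             x-=40
--         if st[i]=='3':
--             y-=40
--         ris.append((y,x))
--     return ris
-- ===== SOURCE B (Python) =====
-- def convertitore(st):
--     st = str(st)
--
--     def delta(c):
--         if c == '0':
--             return (0, 40)
--         if c == '1':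
--             return (40, 0)
--         if c == '2':
--             return (0, -40)
--         if c == '3':
--             return (-40, 0)
--         return (0, 0)
--
--     # Divide and conquer: positions of a string = positions of its left half,
--     # followed by positions of the right half shifted by the left half's total displacement.
--     def solve(s):
--         if not s:
--             return [], (0, 0)
--         if len(s) == 1:
--             d = delta(s[0])
--             return [d], d
--         m = len(s) // 2
--         left, dl = solve(s[:m])
--         right, dr = solve(s[m:])
--         return left + [(y + dl[0], x + dl[1]) for (y, x) in right], (dl[0] + dr[0], dl[1] + dr[1])
--
--     return solve(st)[0]
-- ===== Notes on version B (the rewrite author's own statement) =====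
-- stated objective: alternative
-- what changed: Replaces the sequential accumulating loop with a divide-and-conquer: each half is solved independently and the right half's positions are shifted by the left half's total displacement, correct because displacements compose additively.
import Mathlib
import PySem

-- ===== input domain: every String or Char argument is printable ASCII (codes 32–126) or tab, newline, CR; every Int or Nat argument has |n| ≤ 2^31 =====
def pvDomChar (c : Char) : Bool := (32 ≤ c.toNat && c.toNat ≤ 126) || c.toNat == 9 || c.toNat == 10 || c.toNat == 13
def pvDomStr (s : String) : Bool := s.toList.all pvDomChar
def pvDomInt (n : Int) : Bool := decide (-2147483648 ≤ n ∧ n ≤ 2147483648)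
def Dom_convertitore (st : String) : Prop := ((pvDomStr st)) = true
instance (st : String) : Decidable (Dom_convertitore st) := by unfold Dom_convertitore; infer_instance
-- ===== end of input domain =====

-- B replaces A's single accumulating loop with a divide-and-conquer: solve each half
-- independently and shift the right half's positions by the left half's total displacement.

-- ===== PORT A =====
-- the loop over range(len(st)) with state x, y, appending (y,x) each step
def convertitoreLoop (l : List Char) (x y : Int) : List (Int × Int) :=
  match l with
  | [] => []
  | c :: t =>
      let x := if c = '0' then x + 40 else x
      let y := if c = '1' then y + 40 else y
      let x := if c = '2' then x - 40 else x
      let y := if c = '3' then y - 40 else y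
      (y, x) :: convertitoreLoop t x y

def convertitore (st : String) : List (Int × Int) :=
  convertitoreLoop st.toList 0 0

-- ===== PORT B =====
-- delta c = (dy, dx) for one character, matching Source B's delta helper
def pvDelta (c : Char) : Int × Int :=
  if c = '0' then (0, 40)
  else if c = '1' then (40, 0)
  else if c = '2' then (0, -40)
  else if c = '3' then (-40, 0)
  else (0, 0)

-- Source B's solve: (positions of s starting at the origin, total displacement of s)
def pvSolve : List Char → (List (Int × Int)) × (Int × Int)
  | [] => ([], (0, 0))
  | [c] => ([pvDelta c], pvDelta c)
  | a :: b :: t =>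
      let l := a :: b :: t
      let m := l.length / 2
      let L := pvSolve (l.take m)
      let R := pvSolve (l.drop m)
      (L.1 ++ R.1.map (fun p => (p.1 + L.2.1, p.2 + L.2.2)),
       (L.2.1 + R.2.1, L.2.2 + R.2.2))
termination_by l => l.length
decreasing_by
  · simp [List.length_take]; omega
  · simp [List.length_drop]; omega

def convertitore_alt (st : String) : List (Int × Int) :=
  (pvSolve st.toList).1

-- ===== PRECONDITION & SPEC =====
def Spec_convertitore (st : String) (out : List (Int × Int)) : Prop := out = convertitore_alt st
instance (st : String) (out : List (Int × Int)) : Decidable (Spec_convertitore st out) := by unfold Spec_convertitore; infer_instance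

-- ===== CLAIM (what is proved, stated in full; the proofs are below) =====
def Claim_equal_convertitore : Prop := ∀ (st : String), Dom_convertitore st → Spec_convertitore st (convertitore st)

-- ===== LEMMAS AND PROOFS =====

-- total displacement (ty, tx) of a character list
def pvTotal (l : List Char) : Int × Int :=
  match l with
  | [] => (0, 0)
  | c :: t => ((pvDelta c).1 + (pvTotal t).1, (pvDelta c).2 + (pvTotal t).2)

theorem convertitoreLoop_cons (c : Char) (t : List Char) (x y : Int) :
    convertitoreLoop (c :: t) x y =
      (y + (pvDelta c).1, x + (pvDelta c).2) ::
        convertitoreLoop t (x + (pvDelta c).2) (y + (pvDelta c).1) := by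
  simp only [convertitoreLoop, pvDelta]
  split_ifs <;> simp_all [Prod.ext_iff] <;> constructor <;> ring

theorem pvTotal_append (l1 l2 : List Char) :
    pvTotal (l1 ++ l2) =
      ((pvTotal l1).1 + (pvTotal l2).1, (pvTotal l1).2 + (pvTotal l2).2) := by
  induction l1 with
  | nil => simp [pvTotal]
  | cons c t ih => simp [pvTotal, ih, Prod.ext_iff]; constructor <;> ring

theorem convertitoreLoop_append (l1 l2 : List Char) (x y : Int) :
    convertitoreLoop (l1 ++ l2) x y =
      convertitoreLoop l1 x y ++
        convertitoreLoop l2 (x + (pvTotal l1).2) (y + (pvTotal l1).1) := by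
  induction l1 generalizing x y with
  | nil => simp [convertitoreLoop, pvTotal]
  | cons c t ih =>
      simp only [List.cons_append, convertitoreLoop_cons, ih, pvTotal]
      congr 2 <;> try ring

theorem convertitoreLoop_shift (l : List Char) (x y : Int) :
    convertitoreLoop l x y =
      (convertitoreLoop l 0 0).map (fun p => (p.1 + y, p.2 + x)) := by
  induction l generalizing x y with
  | nil => simp [convertitoreLoop]
  | cons c t ih =>
      rw [convertitoreLoop_cons, convertitoreLoop_cons, List.map_cons]
      simp only [zero_add]
      rw [ih ((pvDelta c).2) ((pvDelta c).1),
          ih (x + (pvDelta c).2) (y + (pvDelta c).1), List.map_map]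
      congr 1
      · simp [Prod.ext_iff]; constructor <;> omega
      · congr 1; funext p; simp [Prod.ext_iff]; constructor <;> omega

theorem pvSolve_split (l1 l2 : List Char) :
    (convertitoreLoop l1 0 0 ++
       (convertitoreLoop l2 0 0).map
         (fun p => (p.1 + (pvTotal l1).1, p.2 + (pvTotal l1).2)),
     ((pvTotal l1).1 + (pvTotal l2).1, (pvTotal l1).2 + (pvTotal l2).2)) =
      (convertitoreLoop (l1 ++ l2) 0 0, pvTotal (l1 ++ l2)) := by
  rw [convertitoreLoop_append, pvTotal_append,
      convertitoreLoop_shift l2 (0 + (pvTotal l1).2) (0 + (pvTotal l1).1)]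
  simp

theorem pvSolve_eq (l : List Char) :
    pvSolve l = (convertitoreLoop l 0 0, pvTotal l) := by
  induction l using pvSolve.induct with
  | case1 => simp [pvSolve, convertitoreLoop, pvTotal]
  | case2 c =>
      rw [show convertitoreLoop [c] 0 0 =
            [(0 + (pvDelta c).1, 0 + (pvDelta c).2)] by
          rw [convertitoreLoop_cons]; rfl]
      simp [pvSolve, pvTotal]
  | case3 a b t l m ihL ihR =>
      simp only [pvSolve]
      rw [ihL, ihR, pvSolve_split, List.take_append_drop]

-- ===== VERDICT (by name: the statement is the Claim_ definition above) =====
theorem convertitore_spec : Claim_equal_convertitore := by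
  intro st _
  unfold Spec_convertitore convertitore convertitore_alt
  rw [pvSolve_eq]
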